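-- pv_equiv track=rewrite | github.com/Medhashah/Big-DataProject | Section A/group14/FileInputManager.py | Process_column_name_for_dataframe
-- ===== SOURCE A (Python) =====
-- def Process_column_name_for_dataframe(str):
--     converted = []
--     dict = {"#": "num", "%": "percent","@":"at", "&":"and",
--             "*":"_","$":"dollar","+":"plus",
--             "-":"_","=":"equal",
--             "^":"6","!":"ex","(":"_",")":"_","\n":"_"
--             }
--     for i in range(0, len(str)):
--         if str[i].isalnum():
--             converted.append(str[i])
--         elif str[i] in dict:
--             converted.append(dict[str[i]])
--         else:
--             converted.append('_')
--     result = ''.join(converted)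
--     return result
-- ===== SOURCE B (Python) =====
-- _TABLE = str.maketrans({"#": "num", "%": "percent", "@": "at", "&": "and",
--                         "*": "_", "$": "dollar", "+": "plus", "-": "_",
--                         "=": "equal", "^": "6", "!": "ex", "(": "_",
--                         ")": "_", "\n": "_"})
--
--
-- def Process_column_name_for_dataframe(str):
--     translated = str.translate(_TABLE)
--     return ''.join(c if c.isalnum() else '_' for c in translated)
-- ===== Notes on version B (the rewrite author's own statement) =====
-- stated objective: idiomatic
-- what changed: Replaced A's per-character if/elif/else loop with an explicit dict lookup and list append by a str.maketrans translation table applied in one str.translate pass followed by a join of c-if-isalnum-else-underscore over the translated string.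
import Mathlib
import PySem

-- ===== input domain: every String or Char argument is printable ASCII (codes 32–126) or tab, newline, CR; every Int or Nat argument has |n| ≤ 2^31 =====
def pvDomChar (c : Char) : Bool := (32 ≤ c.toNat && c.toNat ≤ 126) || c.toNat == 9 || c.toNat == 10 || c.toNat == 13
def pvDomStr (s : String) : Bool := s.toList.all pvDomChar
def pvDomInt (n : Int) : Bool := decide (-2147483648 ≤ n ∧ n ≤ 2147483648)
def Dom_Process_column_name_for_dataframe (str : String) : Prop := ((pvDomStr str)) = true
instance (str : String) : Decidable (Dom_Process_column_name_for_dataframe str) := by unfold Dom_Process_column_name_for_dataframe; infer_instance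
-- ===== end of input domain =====

-- B replaces A's per-character if/elif/else dict loop by a translation-table pass followed by
-- an isalnum-or-underscore pass (idiomatic str.translate decomposition); same return value.

-- ===== PORT A =====
-- the special-character dict of A, values as character lists
def pvADict : PySem.Dict Char (List Char) :=
  PySem.Dict.ofList [('#', "num".toList), ('%', "percent".toList), ('@', "at".toList),
    ('&', "and".toList), ('*', "_".toList), ('$', "dollar".toList), ('+', "plus".toList),
    ('-', "_".toList), ('=', "equal".toList), ('^', "6".toList), ('!', "ex".toList),
    ('(', "_".toList), (')', "_".toList), ('\n', "_".toList)]

def Process_column_name_for_dataframe (str : String) : String :=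
  -- for i in range(0, len(str)): … str[i] …  — the index loop reads the characters in order
  let converted : List (List Char) :=
    str.toList.foldl
      (fun acc c =>
        if PySem.Chars.isalnum c then acc ++ [[c]]
        else if pvADict.contains c then acc ++ [pvADict.getD c []]
        else acc ++ [['_']]) []
  String.ofList (PySem.Chars.join [] converted)

-- ===== PORT B =====
-- str.maketrans table: each key mapped to its replacement, any other character to itself
def pvTrans (c : Char) : List Char :=
  if c = '#' then "num".toList else if c = '%' then "percent".toList
  else if c = '@' then "at".toList else if c = '&' then "and".toList
  else if c = '*' then "_".toList else if c = '$' then "dollar".toList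
  else if c = '+' then "plus".toList else if c = '-' then "_".toList
  else if c = '=' then "equal".toList else if c = '^' then "6".toList
  else if c = '!' then "ex".toList else if c = '(' then "_".toList
  else if c = ')' then "_".toList else if c = '\n' then "_".toList
  else [c]

def Process_column_name_for_dataframe_alt (str : String) : String :=
  let translated := str.toList.flatMap pvTrans
  String.ofList (translated.map (fun c => if PySem.Chars.isalnum c then c else '_'))

-- ===== PRECONDITION & SPEC =====
def Spec_Process_column_name_for_dataframe (str : String) (out : String) : Prop := out = Process_column_name_for_dataframe_alt str
instance (str : String) (out : String) : Decidable (Spec_Process_column_name_for_dataframe str out) := by unfold Spec_Process_column_name_for_dataframe; infer_instance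

-- ===== CLAIM (what is proved, stated in full; the proofs are below) =====
def Claim_equal_Process_column_name_for_dataframe : Prop := ∀ (str : String), Dom_Process_column_name_for_dataframe str → Spec_Process_column_name_for_dataframe str (Process_column_name_for_dataframe str)

-- ===== LEMMAS AND PROOFS =====

-- A's piece for one character
def pvPiece (c : Char) : List Char :=
  if PySem.Chars.isalnum c then [c]
  else if pvADict.contains c then pvADict.getD c []
  else ['_']

theorem join_nil_flatten (l : List (List Char)) : PySem.Chars.join [] l = l.flatten := by
  induction l with
  | nil => rfl
  | cons h t ih => cases t <;> simp_all [PySem.Chars.join, List.intercalate, List.intersperse]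

-- per-character agreement: A's piece equals B's translated-then-filtered piece
theorem piece_eq (c : Char) :
    pvPiece c = (pvTrans c).map (fun c => if PySem.Chars.isalnum c then c else '_') := by
  by_cases h1 : c = '#'; · subst h1; decide
  by_cases h2 : c = '%'; · subst h2; decide
  by_cases h3 : c = '@'; · subst h3; decide
  by_cases h4 : c = '&'; · subst h4; decide
  by_cases h5 : c = '*'; · subst h5; decide
  by_cases h6 : c = '$'; · subst h6; decide
  by_cases h7 : c = '+'; · subst h7; decide
  by_cases h8 : c = '-'; · subst h8; decide
  by_cases h9 : c = '='; · subst h9; decide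
  by_cases h10 : c = '^'; · subst h10; decide
  by_cases h11 : c = '!'; · subst h11; decide
  by_cases h12 : c = '('; · subst h12; decide
  by_cases h13 : c = ')'; · subst h13; decide
  by_cases h14 : c = '\n'; · subst h14; decide
  -- c is none of the dict keys: the dict lookup fails and the table leaves c unchanged
  have he : pvADict = PySem.Dict.mk [('#', "num".toList), ('%', "percent".toList), ('@', "at".toList),
      ('&', "and".toList), ('*', "_".toList), ('$', "dollar".toList), ('+', "plus".toList),
      ('-', "_".toList), ('=', "equal".toList), ('^', "6".toList), ('!', "ex".toList),
      ('(', "_".toList), (')', "_".toList), ('\n', "_".toList)] := by decide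
  have hcont : pvADict.contains c = false := by
    rw [he]
    simp [PySem.Dict.contains_mk]
    exact ⟨Ne.symm h1, Ne.symm h2, Ne.symm h3, Ne.symm h4, Ne.symm h5, Ne.symm h6, Ne.symm h7,
      Ne.symm h8, Ne.symm h9, Ne.symm h10, Ne.symm h11, Ne.symm h12, Ne.symm h13, Ne.symm h14⟩
  have htr : pvTrans c = [c] := by
    simp [pvTrans, h1, h2, h3, h4, h5, h6, h7, h8, h9, h10, h11, h12, h13, h14]
  simp [pvPiece, hcont, htr]
  by_cases ha : PySem.Chars.isalnum c = true <;> simp [ha]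

theorem Process_column_name_for_dataframe_spec : Claim_equal_Process_column_name_for_dataframe := by
  intro s _
  show Process_column_name_for_dataframe s = Process_column_name_for_dataframe_alt s
  unfold Process_column_name_for_dataframe Process_column_name_for_dataframe_alt
  dsimp only
  have hf : (fun (acc : List (List Char)) c =>
      if PySem.Chars.isalnum c then acc ++ [[c]]
      else if pvADict.contains c then acc ++ [pvADict.getD c []]
      else acc ++ [['_']]) = fun acc c => acc ++ [pvPiece c] := by
    funext acc c; simp only [pvPiece]; split_ifs <;> rfl
  rw [hf, PySem.List.foldl_append_singleton_eq_map, join_nil_flatten]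
  congr 1
  rw [List.flatMap, List.map_flatten, List.map_map]
  congr 1
  exact List.map_congr_left (fun c _ => piece_eq c)
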